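-- pv_equiv track=rewrite | github.com/Marksio90/Data_Genius | agents/data_understanding/target_detector.py | _match_column_name
-- ===== SOURCE A (Python) =====
-- from typing import Any, Dict, Iterable, List, Optional, Tuple
--
-- def _match_column_name(
--
--     candidate: Optional[str],
--     columns: Iterable[str]
-- ) -> Optional[str]:
--     """
--     Fuzzy column name matching (case-insensitive, handles spaces/underscores).
--     """
--     if not candidate:
--         return None
--
--     cols = list(columns)
--     candidate_low = candidate.strip().lower()
--
--     # Exact match
--     for c in cols:
--         if c == candidate:
--             return c
--
--     # Case-insensitive match
--     for c in cols:
--         if c.lower() == candidate_low: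
--             return c
--
--     # Relaxed match (ignore spaces/underscores)
--     relaxed = candidate_low.replace("_", "").replace(" ", "")
--     for c in cols:
--         if c.lower().replace("_", "").replace(" ", "") == relaxed:
--             return c
--
--     return None
-- ===== SOURCE B (Python) =====
-- def _match_column_name(candidate, columns):
--     if not candidate:
--         return None
--     candidate_low = candidate.strip().lower()
--     relaxed = candidate_low.replace("_", "").replace(" ", "")
--     first_exact = first_ci = first_relaxed = None
--     for c in columns:
--         if first_exact is None and c == candidate:
--             first_exact = c
--         if first_ci is None and c.lower() == candidate_low:
--             first_ci = c
--         if first_relaxed is None and c.lower().replace("_", "").replace(" ", "") == relaxed: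
--             first_relaxed = c
--     if first_exact is not None:
--         return first_exact
--     if first_ci is not None:
--         return first_ci
--     return first_relaxed
-- ===== Notes on version B (the rewrite author's own statement) =====
-- stated objective: alternative
-- what changed: Replaced A's three sequential scans over the column list by a single pass that tracks the first exact, first case-insensitive and first relaxed match in three Option slots, combined after the loop.
import Mathlib
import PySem

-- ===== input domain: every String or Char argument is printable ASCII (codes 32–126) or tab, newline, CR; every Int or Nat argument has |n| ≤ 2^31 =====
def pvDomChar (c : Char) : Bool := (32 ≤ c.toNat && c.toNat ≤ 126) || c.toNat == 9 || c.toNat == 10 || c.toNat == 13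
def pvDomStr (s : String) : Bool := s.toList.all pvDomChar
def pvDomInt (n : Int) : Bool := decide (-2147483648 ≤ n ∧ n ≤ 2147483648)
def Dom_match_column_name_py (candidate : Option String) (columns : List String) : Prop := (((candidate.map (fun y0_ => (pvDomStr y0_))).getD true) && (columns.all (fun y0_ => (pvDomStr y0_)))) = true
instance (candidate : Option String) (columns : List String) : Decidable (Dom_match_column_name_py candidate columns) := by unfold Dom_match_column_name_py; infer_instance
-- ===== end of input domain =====

-- B replaces A's three sequential scans by one pass tracking three first-match slots (alternative decomposition, same cost).

-- ===== PORT A =====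
-- A's three for-loops with early return are transliterated as three sequential find? scans.
def match_column_name_py (candidate : Option String) (columns : List String) : Option String :=
  match candidate with
  | none => none
  | some cand =>
    if cand = "" then none
    else
      let candidateLow := PySem.Str.lower (PySem.Str.strip cand)
      match columns.find? (fun c => c == cand) with
      | some c => some c
      | none =>
        match columns.find? (fun c => PySem.Str.lower c == candidateLow) with
        | some c => some c
        | none =>
          let relaxed := PySem.Str.replace (PySem.Str.replace candidateLow "_" "") " " ""
          match columns.find? (fun c => PySem.Str.replace (PySem.Str.replace (PySem.Str.lower c) "_" "") " " "" == relaxed) with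
          | some c => some c
          | none => none

-- ===== PORT B =====
-- One fold over columns maintaining (first_exact, first_ci, first_relaxed).
def match_column_name_py_alt (candidate : Option String) (columns : List String) : Option String :=
  match candidate with
  | none => none
  | some cand =>
    if cand = "" then none
    else
      let candidateLow := PySem.Str.lower (PySem.Str.strip cand)
      let relaxed := PySem.Str.replace (PySem.Str.replace candidateLow "_" "") " " ""
      let st := columns.foldl
        (fun (s : Option String × Option String × Option String) c =>
          (if s.1.isNone && c == cand then some c else s.1,
           if s.2.1.isNone && PySem.Str.lower c == candidateLow then some c else s.2.1,
           if s.2.2.isNone && PySem.Str.replace (PySem.Str.replace (PySem.Str.lower c) "_" "") " " "" == relaxed then some c else s.2.2))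
        (none, none, none)
      st.1.or (st.2.1.or st.2.2)

-- ===== PRECONDITION & SPEC =====
def Spec_match_column_name_py (candidate : Option String) (columns : List String) (out : Option String) : Prop := out = match_column_name_py_alt candidate columns
instance (candidate : Option String) (columns : List String) (out : Option String) : Decidable (Spec_match_column_name_py candidate columns out) := by unfold Spec_match_column_name_py; infer_instance

-- ===== CLAIM (what is proved, stated in full; the proofs are below) =====
def Claim_equal_match_column_name_py : Prop := ∀ (candidate : Option String) (columns : List String), Dom_match_column_name_py candidate columns → Spec_match_column_name_py candidate columns (match_column_name_py candidate columns)

-- ===== LEMMAS AND PROOFS =====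

-- One first-match slot absorbs one list element, matching find? on the extended list.
theorem slot_step (p : String → Bool) (x : String) (xs : List String) (a : Option String) :
    (if (a.isNone && p x) = true then some x else a).or (xs.find? p)
      = a.or ((x :: xs).find? p) := by
  cases a <;> cases h : p x <;> simp [List.find?, h]

-- The three-slot fold computes the first match of each predicate.
theorem foldl_three (p₁ p₂ p₃ : String → Bool) (xs : List String) (a b c : Option String) :
    xs.foldl (fun (s : Option String × Option String × Option String) x =>
        (if (s.1.isNone && p₁ x) = true then some x else s.1,
         if (s.2.1.isNone && p₂ x) = true then some x else s.2.1,
         if (s.2.2.isNone && p₃ x) = true then some x else s.2.2)) (a, b, c)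
      = (a.or (xs.find? p₁), b.or (xs.find? p₂), c.or (xs.find? p₃)) := by
  induction xs generalizing a b c with
  | nil => simp
  | cons x xs ih =>
    rw [List.foldl_cons, ih, slot_step, slot_step, slot_step]

-- ===== VERDICT (by name: the statement is the Claim_ definition above) =====
theorem match_column_name_py_spec : Claim_equal_match_column_name_py := by
  intro candidate columns _
  unfold Spec_match_column_name_py match_column_name_py match_column_name_py_alt
  cases candidate with
  | none => rfl
  | some cand =>
    by_cases h : cand = ""
    · simp [h]
    · simp only [h, if_false]
      rw [foldl_three]
      simp only [Option.none_or]
      cases columns.find? (fun c => c == cand) <;>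
        cases columns.find? (fun c => PySem.Str.lower c == PySem.Str.lower (PySem.Str.strip cand)) <;>
        cases columns.find? (fun c => PySem.Str.replace (PySem.Str.replace (PySem.Str.lower c) "_" "") " " "" == PySem.Str.replace (PySem.Str.replace (PySem.Str.lower (PySem.Str.strip cand)) "_" "") " " "") <;>
        rfl
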